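-- pv_equiv track=rewrite | github.com/Izymask/advent_of_code_2021 | 10.py | get_missing_sequence_value
-- ===== SOURCE A (Python) =====
-- def get_missing_sequence_value(missing_sequence):
--     values = {
--         ')': 1,
--         ']': 2,
--         '}': 3,
--         '>': 4
--     }
--     result = 0
--     for character in missing_sequence:
--         result *= 5
--         result += values.get(character)
--     return result
-- ===== SOURCE B (Python) =====
-- def get_missing_sequence_value(missing_sequence):
--     values = {
--         ')': 1,
--         ']': 2,
--         '}': 3,
--         '>': 4
--     }
--     result = 0
--     for i, character in enumerate(reversed(missing_sequence)):
--         result += values.get(character) * (5 ** i)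
--     return result
-- ===== Notes on version B (the rewrite author's own statement) =====
-- stated objective: alternative
-- what changed: Replaces the Horner running multiply-by-5 accumulator with an explicit positional power sum over enumerate(reversed(s)), accumulating values[c] * 5**i least-significant-first.
import Mathlib
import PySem

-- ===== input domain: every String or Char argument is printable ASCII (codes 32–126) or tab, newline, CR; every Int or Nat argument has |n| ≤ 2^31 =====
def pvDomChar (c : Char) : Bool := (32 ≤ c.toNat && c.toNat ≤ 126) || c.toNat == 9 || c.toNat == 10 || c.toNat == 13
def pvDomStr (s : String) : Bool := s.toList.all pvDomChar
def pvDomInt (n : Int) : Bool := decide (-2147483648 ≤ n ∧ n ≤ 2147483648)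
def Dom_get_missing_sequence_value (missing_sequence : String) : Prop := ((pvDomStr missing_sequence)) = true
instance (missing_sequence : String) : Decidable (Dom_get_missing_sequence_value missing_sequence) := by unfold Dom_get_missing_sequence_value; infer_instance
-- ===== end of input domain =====

-- B replaces A's Horner multiply-by-5 accumulator with a positional power sum over the
-- reversed string (values[c] * 5^i, least-significant-first); same cost, different decomposition.


-- ===== PORT A =====
-- the `values` dict literal shared by A and B (both Pythons build the same literal)
def pvValues : PySem.Dict Char Int :=
  ((((PySem.Dict.empty).insert ')' 1).insert ']' 2).insert '}' 3).insert '>' 4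

-- values.get(c); `.getD 0` is exact under Pre_ (every character is a dict key there;
-- outside Pre_ both Pythons raise TypeError, which Pre_ excludes)
def pvVal (c : Char) : Int := (pvValues.get? c).getD 0

def get_missing_sequence_value (missing_sequence : String) : Int :=
  missing_sequence.toList.foldl (fun result character => result * 5 + pvVal character) 0

-- ===== PORT B =====
def get_missing_sequence_value_alt (missing_sequence : String) : Int :=
  (PySem.List.enumerate missing_sequence.toList.reverse 0).foldl
    (fun result p => result + pvVal p.2 * 5 ^ p.1.toNat) 0

-- ===== PRECONDITION & SPEC =====
-- Pre_ excludes strings containing a character other than ) ] } > , on which both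
-- Pythons raise TypeError (values.get returns None).
def Pre_get_missing_sequence_value (missing_sequence : String) : Prop :=
  missing_sequence.toList.all (fun c => c ∈ [')', ']', '}', '>']) = true
instance (missing_sequence : String) : Decidable (Pre_get_missing_sequence_value missing_sequence) := by unfold Pre_get_missing_sequence_value; infer_instance

def pvWitness_get_missing_sequence_value : String := ")]}>"

def Spec_get_missing_sequence_value (missing_sequence : String) (out : Int) : Prop := out = get_missing_sequence_value_alt missing_sequence
instance (missing_sequence : String) (out : Int) : Decidable (Spec_get_missing_sequence_value missing_sequence out) := by unfold Spec_get_missing_sequence_value; infer_instance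

-- ===== CLAIM (what is proved, stated in full; the proofs are below) =====
def Claim_equal_get_missing_sequence_value : Prop := ∀ (missing_sequence : String), Dom_get_missing_sequence_value missing_sequence → Pre_get_missing_sequence_value missing_sequence → Spec_get_missing_sequence_value missing_sequence (get_missing_sequence_value missing_sequence)

-- ===== LEMMAS AND PROOFS =====

-- A's Horner loop with a seeded accumulator
lemma hornerA_acc (l : List Char) (acc : Int) :
    l.foldl (fun r c => r * 5 + pvVal c) acc
      = acc * 5 ^ l.length + l.foldl (fun r c => r * 5 + pvVal c) 0 := by
  induction l generalizing acc with
  | nil => simp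
  | cons c l ih =>
    simp only [List.foldl_cons, List.length_cons]
    rw [ih (acc * 5 + pvVal c), ih (0 * 5 + pvVal c)]
    ring

-- B's power-sum loop: shifting the enumerate start by s multiplies the contribution by 5^s
lemma powsum_shift (m : List Char) (s : Nat) (acc : Int) :
    (PySem.List.enumerate m (s : Int)).foldl (fun r p => r + pvVal p.2 * 5 ^ p.1.toNat) acc
      = acc + 5 ^ s * (PySem.List.enumerate m 0).foldl (fun r p => r + pvVal p.2 * 5 ^ p.1.toNat) 0 := by
  induction m generalizing s acc with
  | nil => simp [PySem.List.enumerate_nil]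
  | cons c m ih =>
    rw [PySem.List.enumerate_cons, PySem.List.enumerate_cons]
    simp only [List.foldl_cons]
    rw [show ((s : Int) + 1) = (((s + 1 : Nat)) : Int) by push_cast; ring,
        show ((0 : Int) + 1) = (((1 : Nat)) : Int) by norm_num]
    rw [ih (s + 1), ih 1]
    simp only [Int.toNat_natCast, Int.toNat_zero]
    ring

-- Horner over l equals the power sum over l.reverse
lemma main_eq (l : List Char) :
    l.foldl (fun r c => r * 5 + pvVal c) 0
      = (PySem.List.enumerate l.reverse 0).foldl (fun r p => r + pvVal p.2 * 5 ^ p.1.toNat) 0 := by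
  induction l with
  | nil => simp [PySem.List.enumerate_nil]
  | cons c l ih =>
    simp only [List.foldl_cons, List.reverse_cons]
    rw [hornerA_acc l (0 * 5 + pvVal c)]
    rw [PySem.List.enumerate_append]
    simp only [zero_add, List.foldl_append]
    rw [powsum_shift]
    rw [← ih]
    simp only [PySem.List.enumerate_cons, PySem.List.enumerate_nil, List.foldl_cons,
      List.foldl_nil, List.length_reverse, Int.toNat_zero]
    ring

-- ===== VERDICT (by name: the statement is the Claim_ definition above) =====
theorem get_missing_sequence_value_spec : Claim_equal_get_missing_sequence_value := by
  intro s _ _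
  unfold Spec_get_missing_sequence_value get_missing_sequence_value get_missing_sequence_value_alt
  exact main_eq s.toList
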